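-- pv_equiv track=rewrite | github.com/mdthewzrd/edge-dev-main-v2 | backend/src/tools/backtest_generator.py | calculate_code_stats
-- ===== SOURCE A (Python) =====
-- from typing import Dict, Any, Optional, List
--
-- def calculate_code_stats(code: str) -> Dict[str, Any]:
--     """
--     Calculate code statistics
--
--     Returns:
--         Dictionary with code statistics
--     """
--
--     lines = code.split("\n")
--     non_empty_lines = [l for l in lines if l.strip()]
--
--     return {
--         "total_lines": len(lines),
--         "code_lines": len(non_empty_lines),
--         "comment_lines": len([l for l in lines if l.strip().startswith("#")]),
--         "blank_lines": len([l for l in lines if not l.strip()]),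
--         "estimated_chars": len(code)
--     }
-- ===== SOURCE B (Python) =====
-- def calculate_code_stats(code: str):
--     # Single character-level scan: a small state machine classifies each line
--     # as it is being read, without ever splitting the string or stripping lines.
--     total_lines = 1
--     code_lines = comment_lines = blank_lines = 0
--     seen = False      # current line has a non-whitespace character
--     comment = False   # first non-whitespace character of current line is '#'
--     for ch in code:
--         if ch == "\n":
--             total_lines += 1
--             if seen:
--                 code_lines += 1
--             else:
--                 blank_lines += 1
--             if comment:
--                 comment_lines += 1
--             seen = comment = False
--         elif not seen and not ch.isspace():
--             seen = True
--             comment = ch == "#"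
--     if seen:
--         code_lines += 1
--     else:
--         blank_lines += 1
--     if comment:
--         comment_lines += 1
--     return {
--         "total_lines": total_lines,
--         "code_lines": code_lines,
--         "comment_lines": comment_lines,
--         "blank_lines": blank_lines,
--         "estimated_chars": len(code),
--     }
-- ===== Notes on version B (the rewrite author's own statement) =====
-- stated objective: alternative
-- what changed: Replaces A's split-into-lines plus three separate filter scans with a single character-level state machine over the raw string that classifies each line on the fly (never materialising the line list, never calling strip/startswith).
import Mathlib
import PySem

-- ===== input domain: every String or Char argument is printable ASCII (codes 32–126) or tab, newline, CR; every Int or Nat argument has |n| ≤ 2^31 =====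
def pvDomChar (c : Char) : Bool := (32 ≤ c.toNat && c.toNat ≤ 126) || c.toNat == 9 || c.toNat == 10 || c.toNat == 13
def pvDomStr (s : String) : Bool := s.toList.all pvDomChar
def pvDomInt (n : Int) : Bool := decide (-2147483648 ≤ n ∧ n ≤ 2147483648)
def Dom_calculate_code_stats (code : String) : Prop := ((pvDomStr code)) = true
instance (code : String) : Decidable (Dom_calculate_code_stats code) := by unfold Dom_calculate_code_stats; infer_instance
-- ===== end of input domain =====

-- B replaces A's split-into-lines + three filter scans by a single character-level
-- state machine over the raw string (objective: alternative decomposition).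


-- ===== PORT A =====
-- A: split into lines, then three separate filter scans over the line list
def calculate_code_stats (code : String) : List (String × Int) :=
  let lines := (PySem.Str.split? code "\n").getD []
  let non_empty_lines := lines.filter (fun l => !(PySem.Str.strip l == ""))
  [("total_lines", (lines.length : Int)),
   ("code_lines", (non_empty_lines.length : Int)),
   ("comment_lines", ((lines.filter (fun l => PySem.Str.startswith (PySem.Str.strip l) "#")).length : Int)),
   ("blank_lines", ((lines.filter (fun l => PySem.Str.strip l == "")).length : Int)),
   ("estimated_chars", (PySem.Str.len code : Int))]

-- ===== PORT B =====
-- B: one character-level state machine scan; state =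
-- (total, code, comment, blank, seen nonspace in current line, current line is a comment)
def pvStep (st : Int × Int × Int × Int × Bool × Bool) (ch : Char) :
    Int × Int × Int × Int × Bool × Bool :=
  let (t, c, m, b, seen, com) := st
  if ch = '\n' then
    (t + 1, if seen then c + 1 else c, if com then m + 1 else m,
     if seen then b else b + 1, false, false)
  else if !seen && !(PySem.Chars.isspace ch) then
    (t, c, m, b, true, ch == '#')
  else st

def calculate_code_stats_alt (code : String) : List (String × Int) :=
  let st := code.toList.foldl pvStep (1, 0, 0, 0, false, false)
  -- st = (total, code, comment, blank, seen, comment-flag); the final line is closed here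
  [("total_lines", st.1),
   ("code_lines", if st.2.2.2.2.1 then st.2.1 + 1 else st.2.1),
   ("comment_lines", if st.2.2.2.2.2 then st.2.2.1 + 1 else st.2.2.1),
   ("blank_lines", if st.2.2.2.2.1 then st.2.2.2.1 else st.2.2.2.1 + 1),
   ("estimated_chars", (PySem.Str.len code : Int))]

-- ===== PRECONDITION & SPEC =====
def Spec_calculate_code_stats (code : String) (out : List (String × Int)) : Prop := out = calculate_code_stats_alt code
instance (code : String) (out : List (String × Int)) : Decidable (Spec_calculate_code_stats code out) := by unfold Spec_calculate_code_stats; infer_instance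

-- ===== CLAIM (what is proved, stated in full; the proofs are below) =====
def Claim_equal_calculate_code_stats : Prop := ∀ (code : String), Dom_calculate_code_stats code → Spec_calculate_code_stats code (calculate_code_stats code)

-- ===== LEMMAS AND PROOFS =====

-- line-level predicates the two ports are related through
def pvHasNS (l : List Char) : Bool := l.any (fun ch => !PySem.Chars.isspace ch)
def pvFirstHash (l : List Char) : Bool := (l.dropWhile PySem.Chars.isspace).head? == some '#'

lemma pv_splitOn_go (fuel : Nat) (l cur : List Char) (acc : List (List Char))
    (h : l.length < fuel) :
    PySem.Chars.splitOn.go ['\n'] fuel l cur acc =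
      acc.reverse ++ (List.splitOnP (· == '\n') l).modifyHead (cur.reverse ++ ·) := by
  induction fuel generalizing l cur acc with
  | zero => omega
  | succ fuel ih =>
    cases l with
    | nil => simp [PySem.Chars.splitOn.go]
    | cons c rest =>
      by_cases hc : c = '\n'
      · subst hc
        rw [show PySem.Chars.splitOn.go ['\n'] (fuel + 1) ('\n' :: rest) cur acc =
              PySem.Chars.splitOn.go ['\n'] fuel (List.drop 1 ('\n' :: rest)) [] (cur.reverse :: acc) by
            simp [PySem.Chars.splitOn.go, List.isPrefixOf]]
        rw [ih _ _ _ (by simpa using Nat.lt_of_succ_lt_succ (by simpa using h))]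
        simp [List.splitOnP_cons]
        cases List.splitOnP (· == '\n') rest <;> simp
      · rw [show PySem.Chars.splitOn.go ['\n'] (fuel + 1) (c :: rest) cur acc =
              PySem.Chars.splitOn.go ['\n'] fuel rest (c :: cur) acc by
            simp [PySem.Chars.splitOn.go, List.isPrefixOf]
            intro h'; exact absurd h'.symm hc]
        rw [ih _ _ _ (by simp at h; omega)]
        simp [List.splitOnP_cons, hc]
        cases List.splitOnP (· == '\n') rest <;> simp

lemma pv_splitOn_eq (cs : List Char) :
    PySem.Chars.splitOn cs ['\n'] = List.splitOnP (· == '\n') cs := by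
  rw [PySem.Chars.splitOn, pv_splitOn_go _ _ _ _ (by omega)]
  cases List.splitOnP (· == '\n') cs <;> simp

lemma pv_beq_toList (s t : String) : (s == t) = (s.toList == t.toList) := by
  rw [Bool.eq_iff_iff, beq_iff_eq, beq_iff_eq, String.toList_inj]

lemma pv_dropWhile_append (p : Char → Bool) (l : List Char) (a : Char) (h : p a = false) :
    (l ++ [a]).dropWhile p = l.dropWhile p ++ [a] := by
  induction l with
  | nil => simp [List.dropWhile, h]
  | cons x xs ih => by_cases hx : p x <;> simp [List.dropWhile, hx, ih]

lemma pv_dropWhile_head (p : Char → Bool) (l : List Char) (h : Char) (tl : List Char)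
    (heq : l.dropWhile p = h :: tl) : p h = false := by
  induction l with
  | nil => simp at heq
  | cons x xs ih =>
    by_cases hx : p x
    · exact ih (by simpa [List.dropWhile, hx] using heq)
    · rw [List.dropWhile_cons_of_neg (by simpa using hx)] at heq
      cases heq; simpa using hx

lemma pv_strip_empty (l : List Char) :
    (PySem.Chars.strip l == []) = !pvHasNS l := by
  simp only [PySem.Chars.strip, PySem.Chars.rstrip, PySem.Chars.lstrip, pvHasNS]
  cases hb : l.any (fun ch => !PySem.Chars.isspace ch) with
  | false =>
    have hall : l.dropWhile PySem.Chars.isspace = [] := by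
      rw [List.dropWhile_eq_nil_iff]
      intro x hx
      have := List.any_eq_false.mp hb x hx
      simpa using this
    simp [hall]
  | true =>
    simp only [List.any_eq_true, Bool.not_eq_true'] at hb
    obtain ⟨x, hxl, hx⟩ := hb
    have hmem : x ∈ l.dropWhile PySem.Chars.isspace := by
      have hsplit := List.takeWhile_append_dropWhile (p := PySem.Chars.isspace) (l := l)
      rcases List.mem_append.mp (by rw [hsplit]; exact hxl) with h1 | h2
      · exact absurd (List.mem_takeWhile_imp h1) (by simp [hx])
      · exact h2
    rw [Bool.not_true, Bool.eq_false_iff]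
    simp only [ne_eq, beq_iff_eq, List.reverse_eq_nil_iff, List.dropWhile_eq_nil_iff]
    intro hall
    have := hall x (by simpa using hmem)
    rw [hx] at this; exact absurd this (by simp)

lemma pv_strip_hash (l : List Char) :
    PySem.Chars.startswith (PySem.Chars.strip l) ['#'] = pvFirstHash l := by
  simp only [PySem.Chars.strip, PySem.Chars.lstrip, pvFirstHash]
  cases hd : l.dropWhile PySem.Chars.isspace with
  | nil => simp [PySem.Chars.rstrip, PySem.Chars.startswith]
  | cons h tl =>
    have hh : PySem.Chars.isspace h = false := pv_dropWhile_head _ _ _ _ hd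
    have hr : PySem.Chars.rstrip (h :: tl) = h :: PySem.Chars.rstrip tl := by
      simp only [PySem.Chars.rstrip, List.reverse_cons]
      rw [pv_dropWhile_append _ _ _ hh, List.reverse_append]
      simp
    rw [hr]
    simp only [PySem.Chars.startswith, List.isPrefixOf, List.head?_cons]
    cases hch : h == '#'
    · simp_all; exact fun h' => absurd h'.symm hch
    · simp_all

lemma pv_scan (cs : List Char) (t c m b : Int) (seen com : Bool)
    (hk : seen = false → com = false) :
    (let st := cs.foldl pvStep (t, c, m, b, seen, com)
     ((st.1, (if st.2.2.2.2.1 then st.2.1 + 1 else st.2.1),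
       (if st.2.2.2.2.2 then st.2.2.1 + 1 else st.2.2.1),
       (if st.2.2.2.2.1 then st.2.2.2.1 else st.2.2.2.1 + 1)) : Int × Int × Int × Int)) =
    (match List.splitOnP (fun x => x == '\n') cs with
     | [] => (t, c, m, b)   -- unreachable: splitOnP is never []
     | L0 :: Ls =>
        (t + (Ls.length : Int),
         (if seen || pvHasNS L0 then c + 1 else c) + (Ls.countP pvHasNS : Int),
         (if (if seen then com else pvFirstHash L0) then m + 1 else m) + (Ls.countP pvFirstHash : Int),
         (if seen || pvHasNS L0 then b else b + 1) + (Ls.countP (fun l => !pvHasNS l) : Int))) := by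
  induction cs generalizing t c m b seen com with
  | nil =>
    simp only [List.foldl_nil, List.splitOnP_nil]
    cases seen
    · have := hk rfl; subst this; simp [pvHasNS, pvFirstHash]
    · cases com <;> simp [pvHasNS]
  | cons ch rest ih =>
    rw [List.foldl_cons]
    by_cases hnl : ch = '\n'
    · subst hnl
      have hstep : pvStep (t, c, m, b, seen, com) '\n' =
          (t + 1, if seen then c + 1 else c, if com then m + 1 else m,
           if seen then b else b + 1, false, false) := by
        simp [pvStep]
      rw [hstep, ih _ _ _ _ _ _ (fun _ => rfl)]
      rw [List.splitOnP_cons]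
      simp only [beq_self_eq_true, if_true]
      cases hX : List.splitOnP (fun x => x == '\n') rest with
      | nil => exact absurd hX (List.splitOnP_ne_nil _ _)
      | cons L0 Ls =>
        have hH : pvHasNS ([] : List Char) = false := by simp [pvHasNS]
        have hF : pvFirstHash ([] : List Char) = false := by simp [pvFirstHash]
        rw [hH, hF]
        clear ih hstep hX
        cases seen <;> cases com <;> cases hb : pvHasNS L0 <;> cases hf : pvFirstHash L0 <;>
          simp_all <;> omega
    · by_cases hs : seen
      · have hstep : pvStep (t, c, m, b, seen, com) ch = (t, c, m, b, seen, com) := by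
          simp [pvStep, hnl, hs]
        rw [hstep, ih _ _ _ _ _ _ hk, List.splitOnP_cons]
        simp only [show (ch == '\n') = false by simpa using hnl, Bool.false_eq_true, if_false]
        cases hX : List.splitOnP (fun x => x == '\n') rest with
        | nil => exact absurd hX (List.splitOnP_ne_nil _ _)
        | cons L0 Ls => simp [hs]
      · have hcom := hk (by simpa using hs); subst hcom
        simp only [Bool.not_eq_true] at hs; subst hs
        by_cases hsp : PySem.Chars.isspace ch
        · have hstep : pvStep (t, c, m, b, false, false) ch = (t, c, m, b, false, false) := by
            simp [pvStep, hnl, hsp]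
          rw [hstep, ih _ _ _ _ _ _ (fun _ => rfl), List.splitOnP_cons]
          simp only [show (ch == '\n') = false by simpa using hnl, Bool.false_eq_true, if_false]
          cases hX : List.splitOnP (fun x => x == '\n') rest with
          | nil => exact absurd hX (List.splitOnP_ne_nil _ _)
          | cons L0 Ls =>
            have h1 : pvHasNS (ch :: L0) = pvHasNS L0 := by simp [pvHasNS, hsp]
            have h2 : pvFirstHash (ch :: L0) = pvFirstHash L0 := by
              unfold pvFirstHash
              rw [List.dropWhile_cons_of_pos (by simpa using hsp)]
            simp [h1, h2]
        · have hstep : pvStep (t, c, m, b, false, false) ch = (t, c, m, b, true, ch == '#') := by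
            simp [pvStep, hnl, hsp]
          rw [hstep, ih _ _ _ _ _ _ (by simp), List.splitOnP_cons]
          simp only [show (ch == '\n') = false by simpa using hnl, Bool.false_eq_true, if_false]
          cases hX : List.splitOnP (fun x => x == '\n') rest with
          | nil => exact absurd hX (List.splitOnP_ne_nil _ _)
          | cons L0 Ls =>
            have h1 : pvHasNS (ch :: L0) = true := by simp [pvHasNS, hsp]
            have h2 : pvFirstHash (ch :: L0) = (ch == '#') := by
              unfold pvFirstHash
              rw [List.dropWhile_cons_of_neg (by simpa using hsp)]
              simp
            simp [h1, h2]

-- ===== VERDICT (by name: the statement is the Claim_ definition above) =====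
lemma pv_predA_empty (cl : List Char) :
    (PySem.Str.strip (String.ofList cl) == "") = !pvHasNS cl := by
  rw [pv_beq_toList]
  simp only [PySem.Str.toList_strip, String.toList_ofList]
  simpa using pv_strip_empty cl

lemma pv_predA_hash (cl : List Char) :
    PySem.Str.startswith (PySem.Str.strip (String.ofList cl)) "#" = pvFirstHash cl := by
  simp only [PySem.Str.startswith_eq, PySem.Str.toList_strip, String.toList_ofList]
  simpa using pv_strip_hash cl

theorem calculate_code_stats_spec : Claim_equal_calculate_code_stats := by
  intro code _
  show calculate_code_stats code = calculate_code_stats_alt code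
  unfold calculate_code_stats calculate_code_stats_alt
  have hsplit : (PySem.Str.split? code "\n").getD [] =
      (List.splitOnP (fun x => x == '\n') code.toList).map String.ofList := by
    rw [PySem.Str.split?]
    simp [PySem.Chars.split?, show ("\n" : String).toList = ['\n'] from rfl, pv_splitOn_eq]
  rw [hsplit]
  have hscan := pv_scan code.toList 1 0 0 0 false false (fun _ => rfl)
  cases hX : List.splitOnP (fun x => x == '\n') code.toList with
  | nil => exact absurd hX (List.splitOnP_ne_nil _ _)
  | cons L0 Ls =>
    rw [hX] at hscan
    simp only [Prod.mk.injEq] at hscan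
    obtain ⟨h1, h2, h3, h4⟩ := hscan
    simp only [List.filter_map, List.length_map, Function.comp_def, pv_predA_empty,
      pv_predA_hash, Bool.not_not, List.length_cons]
    generalize hgen : List.foldl pvStep (1, 0, 0, 0, false, false) code.toList = st at h1 h2 h3 h4 ⊢
    obtain ⟨t', c', m', b', s', k'⟩ := st
    cases s' <;> cases k' <;> cases hb : pvHasNS L0 <;> cases hf : pvFirstHash L0 <;>
      simp_all [← List.countP_eq_length_filter,
        show (fun x => pvHasNS x) = pvHasNS from rfl,
        show (fun x => pvFirstHash x) = pvFirstHash from rfl] <;> omega
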